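-- pv_equiv track=rewrite | github.com/CristianTeodorNita/Applications | Basic_functions/spare_numbers.py | lista_numere_pare_while
-- ===== SOURCE A (Python) =====
-- def lista_numere_pare_while(numar_final):
--     numere_pare = []
--     numar = 0
--
--     while numar < numar_final:
--         if numar % 2 == 0:
--             numere_pare.append(numar)
--         numar += 1
--     return numere_pare
-- ===== SOURCE B (Python) =====
-- def lista_numere_pare_while(numar_final):
--     count = -(-numar_final // 2)
--     if count < 0:
--         count = 0
--     return [2 * i for i in range(count)]
-- ===== Notes on version B (the rewrite author's own statement) =====
-- stated objective: simpler
-- what changed: B computes the result length in closed form (ceil(numar_final/2), clamped at 0) and builds the list as [2*i for i in range(count)], replacing A's per-integer while loop with its parity test.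
import Mathlib
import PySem

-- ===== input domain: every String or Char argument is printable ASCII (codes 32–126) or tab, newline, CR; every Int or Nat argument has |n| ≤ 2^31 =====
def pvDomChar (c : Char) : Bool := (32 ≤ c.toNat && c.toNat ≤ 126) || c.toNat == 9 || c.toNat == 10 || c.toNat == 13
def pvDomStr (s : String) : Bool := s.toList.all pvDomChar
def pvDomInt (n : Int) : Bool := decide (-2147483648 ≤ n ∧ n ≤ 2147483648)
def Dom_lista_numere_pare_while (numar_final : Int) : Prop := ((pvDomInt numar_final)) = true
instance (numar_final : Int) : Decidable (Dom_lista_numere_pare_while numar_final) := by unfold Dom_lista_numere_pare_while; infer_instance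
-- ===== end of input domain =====

-- B computes the result length in closed form (ceil(n/2), clamped at 0) and maps i ↦ 2*i
-- over range(count), replacing A's per-integer while loop (objective: simpler).

-- ===== PORT A =====
-- while numar < numar_final: if numar % 2 == 0: append; numar += 1
def pvALoop (numar_final numar : Int) (acc : List Int) : List Int :=
  if numar < numar_final then
    pvALoop numar_final (numar + 1)
      (if PySem.Int.mod numar 2 == 0 then acc ++ [numar] else acc)
  else acc
termination_by (numar_final - numar).toNat
decreasing_by omega

def lista_numere_pare_while (numar_final : Int) : List Int :=
  pvALoop numar_final 0 []

-- ===== PORT B =====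
-- count = -(-numar_final // 2); if count < 0: count = 0; return [2*i for i in range(count)]
def lista_numere_pare_while_alt (numar_final : Int) : List Int :=
  let count0 : Int := -(PySem.Int.floordiv (-numar_final) 2)
  let count : Int := if count0 < 0 then 0 else count0
  (List.range count.toNat).map (fun i : Nat => 2 * (i : Int))

-- ===== PRECONDITION & SPEC =====
def Spec_lista_numere_pare_while (numar_final : Int) (out : List Int) : Prop := out = lista_numere_pare_while_alt numar_final
instance (numar_final : Int) (out : List Int) : Decidable (Spec_lista_numere_pare_while numar_final out) := by unfold Spec_lista_numere_pare_while; infer_instance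

-- ===== CLAIM (what is proved, stated in full; the proofs are below) =====
def Claim_equal_lista_numere_pare_while : Prop := ∀ (numar_final : Int), Dom_lista_numere_pare_while numar_final → Spec_lista_numere_pare_while numar_final (lista_numere_pare_while numar_final)

-- ===== LEMMAS AND PROOFS =====

-- A's loop, started at the even number 2*j, appends exactly the doubles of range' j d,
-- where d counts the evens still below numar_final.
theorem pvALoop_eval (nf : Int) (m : Nat) (h : ∀ j : Nat, 2 * (j : Int) < nf ↔ j < m) :
    ∀ (d j : Nat) (acc : List Int), m - j = d →
      pvALoop nf (2 * (j : Int)) acc = acc ++ (List.range' j d).map (fun i : Nat => 2 * (i : Int)) := by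
  intro d
  induction d with
  | zero =>
    intro j acc hd
    rw [pvALoop]
    have : ¬ 2 * (j : Int) < nf := by rw [h]; omega
    simp [this]
  | succ d ih =>
    intro j acc hd
    have hj : j < m := by omega
    have hlt : 2 * (j : Int) < nf := (h j).mpr hj
    rw [pvALoop]
    have heven : PySem.Int.mod (2 * (j : Int)) 2 == 0 := by
      simp only [beq_iff_eq, PySem.Int.mod_eq_zero_iff_dvd]
      exact ⟨(j : Int), by ring⟩
    rw [if_pos hlt, if_pos heven]
    have hstep : pvALoop nf (2 * (j : Int) + 1) (acc ++ [2 * (j : Int)]) =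
        pvALoop nf (2 * ((j : Int) + 1)) (acc ++ [2 * (j : Int)]) := by
      rw [pvALoop]
      by_cases h1 : 2 * (j : Int) + 1 < nf
      · have hodd : ¬ (PySem.Int.mod (2 * (j : Int) + 1) 2 == 0) := by
          simp only [beq_iff_eq, PySem.Int.mod_eq_zero_iff_dvd]
          omega
        rw [if_pos h1, if_neg hodd,
          show 2 * (j : Int) + 1 + 1 = 2 * ((j : Int) + 1) from by ring]
      · rw [if_neg h1, pvALoop]
        have : ¬ 2 * ((j : Int) + 1) < nf := by omega
        rw [if_neg this]
    rw [hstep]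
    have hcast : 2 * ((j : Int) + 1) = 2 * (((j + 1 : Nat)) : Int) := by push_cast; ring
    rw [hcast, ih (j + 1) (acc ++ [2 * (j : Int)]) (by omega)]
    rw [List.range'_succ, List.map_cons, List.append_assoc]
    rfl

-- ===== VERDICT (by name: the statement is the Claim_ definition above) =====
theorem lista_numere_pare_while_spec : Claim_equal_lista_numere_pare_while := by
  intro nf _
  unfold Spec_lista_numere_pare_while lista_numere_pare_while lista_numere_pare_while_alt
  have hdiv : PySem.Int.floordiv (-nf) 2 = (-nf) / 2 :=
    PySem.Int.floordiv_eq_ediv_of_pos (by norm_num)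
  set count0 : Int := -(PySem.Int.floordiv (-nf) 2) with hc0
  set count : Int := if count0 < 0 then 0 else count0 with hc
  have h : ∀ j : Nat, 2 * (j : Int) < nf ↔ j < count.toNat := by
    intro j
    have hj : (0 : Int) ≤ (j : Int) := Int.natCast_nonneg j
    rw [hc, hc0, hdiv]
    constructor
    · intro hlt
      split_ifs with hneg <;> omega
    · intro hlt
      split_ifs at hlt with hneg <;> omega
  have := pvALoop_eval nf count.toNat h count.toNat 0 [] (by omega)
  simpa [List.range_eq_range', ← hc] using this
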